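-- pv_equiv track=rewrite | github.com/PriyaK1970/Algolution | Set_3.py | is_cyclic_palindrome
-- ===== SOURCE A (Python) =====
-- def is_palindrome(s):
--   return s == s[::-1]
--
-- def is_cyclic_palindrome(s):
--   if is_palindrome(s):
--     return 0
--   n = len(s)
--   min_shifts = float('inf')
--   for i in range(n):
--     head = s[i:] + s[:i]
--     if is_palindrome(head):
--       min_shifts = min(min_shifts, i)
--       break
--     tail = s[-i:] + s[:-i]
--     if is_palindrome(tail):
--       min_shifts = min(min_shifts, i)
--       break
--   if min_shifts == float('inf'):
--     return -1
--   else: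
--     return min_shifts
-- ===== SOURCE B (Python) =====
-- def is_cyclic_palindrome(s):
--     n = len(s)
--     if n == 0:
--         return 0
--     t = s[::-1] * 2
--     best = -1
--     j = t.find(s)
--     while 0 <= j < n:
--         m = (n - j) % n
--         if m % 2 == 0:
--             ks = [m // 2] + ([m // 2 + n // 2] if n % 2 == 0 else [])
--         else:
--             ks = [(m + n) // 2] if n % 2 == 1 else []
--         for k in ks:
--             c = min(k, n - k)
--             if best < 0 or c < best:
--                 best = c
--         j = t.find(s, j + 1)
--     return best
-- ===== Notes on version B (the rewrite author's own statement) =====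
-- stated objective: faster
-- what changed: Replaces A's per-rotation palindrome tests by a reduction to substring search: rotation k of s is a palindrome iff s occurs in rev(s)+rev(s) at position (2n-2k) mod n, so B finds the occurrences of s in the doubled reversed string with str.find and recovers the shifts by solving 2k = n-j (mod n), taking the minimum cost min(k, n-k).
import Mathlib
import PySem

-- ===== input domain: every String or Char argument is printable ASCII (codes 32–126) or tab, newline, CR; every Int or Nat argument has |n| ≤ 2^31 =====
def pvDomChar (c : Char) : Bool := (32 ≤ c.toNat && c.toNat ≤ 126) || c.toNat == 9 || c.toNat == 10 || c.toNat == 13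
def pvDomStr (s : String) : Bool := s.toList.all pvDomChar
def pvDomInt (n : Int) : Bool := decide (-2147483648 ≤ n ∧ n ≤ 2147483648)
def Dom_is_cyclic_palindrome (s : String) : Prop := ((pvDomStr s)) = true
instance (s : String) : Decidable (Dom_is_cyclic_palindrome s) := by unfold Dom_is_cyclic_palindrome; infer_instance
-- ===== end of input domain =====

-- B replaces A's per-rotation palindrome tests by a reduction to substring search:
-- rotation k of s is a palindrome iff s occurs in rev(s)+rev(s) at position (2n-2k) mod n,
-- so B walks the occurrences of s in the doubled reversed string with str.find and recovers
-- the shifts by solving 2k ≡ n-j (mod n); objective: faster (one substring scan instead of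
-- n palindrome tests in the common case).

-- ===== PORT A =====
-- is_palindrome(s): s == s[::-1]  (slice? with step -1 is exact Python slicing)
def pvPal (cs : List Char) : Bool := decide (some cs = PySem.List.slice? cs none none (-1))

-- the 'for i in range(n)' loop with its two breaks (a break with min(inf, i) returns i)
def pvLoopA (cs : List Char) : List Int → Int
  | [] => -1
  | i :: rest =>
    let head := PySem.List.slice cs (some i) none ++ PySem.List.slice cs none (some i)
    if pvPal head then i
    else
      let tail := PySem.List.slice cs (some (-i)) none ++ PySem.List.slice cs none (some (-i))
      if pvPal tail then i
      else pvLoopA cs rest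

def is_cyclic_palindrome (s : String) : Int :=
  let cs := s.toList
  if pvPal cs then 0
  else pvLoopA cs (PySem.List.pyRange 0 (cs.length : Int) 1)

-- ===== PORT B =====
-- the list 'ks' the Python body builds from m = (n - j) % n (the shifts k with 2k ≡ m mod n)
def pvKsB (n j : Int) : List Int :=
  let m := PySem.Int.mod (n - j) n
  if PySem.Int.mod m 2 = 0 then
    [PySem.Int.floordiv m 2] ++
      (if PySem.Int.mod n 2 = 0 then [PySem.Int.floordiv m 2 + PySem.Int.floordiv n 2] else [])
  else
    if PySem.Int.mod n 2 = 1 then [PySem.Int.floordiv (m + n) 2] else []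

-- the 'while 0 <= j < n' loop; the fuel only makes the recursion total: j strictly
-- increases with each t.find(s, j+1) and the loop runs while j < n, so n+1 steps suffice
def pvLoopB (t cs : List Char) (n : Int) : Nat → Int → Int → Int
  | 0, _, best => best
  | fuel+1, j, best =>
    if 0 ≤ j ∧ j < n then
      let best' := (pvKsB n j).foldl
        (fun b k => let c := min k (n - k); if b < 0 || c < b then c else b) best
      pvLoopB t cs n fuel (PySem.Chars.findFrom t cs (j + 1) none) best'
    else best

def is_cyclic_palindrome_alt (s : String) : Int :=
  let cs := s.toList
  let n : Int := (cs.length : Int)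
  if n = 0 then 0
  else
    let t := cs.reverse ++ cs.reverse   -- t = s[::-1] * 2
    pvLoopB t cs n (cs.length + 1) (PySem.Chars.find t cs) (-1)

-- ===== PRECONDITION & SPEC =====
def Spec_is_cyclic_palindrome (s : String) (out : Int) : Prop := out = is_cyclic_palindrome_alt s
instance (s : String) (out : Int) : Decidable (Spec_is_cyclic_palindrome s out) := by unfold Spec_is_cyclic_palindrome; infer_instance

-- ===== CLAIM (what is proved, stated in full; the proofs are below) =====
def Claim_equal_is_cyclic_palindrome : Prop := ∀ (s : String), Dom_is_cyclic_palindrome s → Spec_is_cyclic_palindrome s (is_cyclic_palindrome s)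

-- ===== LEMMAS AND PROOFS =====

-- left rotation by k, and 'rotation k is a palindrome'
def pvRot (cs : List Char) (k : Nat) : List Char := cs.drop k ++ cs.take k
def pvPk (cs : List Char) (k : Nat) : Bool := decide (pvRot cs k = (pvRot cs k).reverse)

-- 'the reversed string occurs rotated by j', the occurrence predicate B's search finds
def pvOcc (cs : List Char) (j : Nat) : Bool := decide (cs = cs.reverse.rotate j)

-- the cost of shift k and the running-minimum update both programs perform
def pvComb (b c : Int) : Int := if b < 0 || c < b then c else b
def pvCost (n : Int) (k : Int) : Int := min k (n - k)

-- the multiset of costs of the palindromic rotations (reference value both sides reach)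
def pvCandCosts (cs : List Char) : List Int :=
  ((List.range cs.length).filter (fun k => pvPk cs k)).map
    (fun (k : Nat) => min (k : Int) ((cs.length : Int) - (k : Int)))

theorem pvPal_eq (cs : List Char) : pvPal cs = decide (cs = cs.reverse) := by
  simp [pvPal, PySem.List.slice?_none_none_neg_one]

theorem pvRot_length (cs : List Char) : pvRot cs cs.length = cs := by
  simp [pvRot]

-- Nat-level image of A's loop
def pvFirstQ (cs : List Char) : List Nat → Int
  | [] => -1
  | i :: rest =>
    if pvPk cs i || pvPk cs (cs.length - i) then (i : Int) else pvFirstQ cs rest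

theorem pvLoopA_eq (cs : List Char) (l : List Nat) (h : ∀ i ∈ l, i < cs.length) :
    pvLoopA cs (List.map (fun (k : Nat) => (k : Int)) l) = pvFirstQ cs l := by
  induction l with
  | nil => rfl
  | cons i rest ih =>
    have hi : i < cs.length := h i (by simp)
    have hhead : PySem.List.slice cs (some (i : Int)) none ++
        PySem.List.slice cs none (some (i : Int)) = pvRot cs i := by
      rw [PySem.List.slice_from_natCast, PySem.List.slice_to_natCast]; rfl
    have htail : PySem.List.slice cs (some (-(i : Int))) none ++
        PySem.List.slice cs none (some (-(i : Int))) = pvRot cs (cs.length - i) := by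
      rcases Nat.eq_zero_or_pos i with h0 | hpos
      · subst h0
        have e1 : PySem.List.slice cs (some (-((0:Nat):Int))) none = cs := by
          norm_num [PySem.List.slice_none_none]
        have e2 : PySem.List.slice cs none (some (-((0:Nat):Int))) = [] := by
          norm_num
          rw [PySem.List.slice_to cs (le_refl 0)]
          rfl
        rw [e1, e2, pvRot]
        simp [List.drop_length, List.take_length]
      · rw [PySem.List.slice_from_neg_natCast cs i hpos,
          PySem.List.slice_to_neg_natCast cs i hpos]; rfl
    simp only [List.map_cons, pvLoopA, pvFirstQ, hhead, htail, pvPal_eq, pvPk]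
    by_cases h1 : pvRot cs i = (pvRot cs i).reverse
    · simp only [decide_eq_true h1, Bool.true_or, if_true]
    · have hb1 : decide (pvRot cs i = (pvRot cs i).reverse) = false := decide_eq_false h1
      by_cases h2 : pvRot cs (cs.length - i) = (pvRot cs (cs.length - i)).reverse
      · simp only [hb1, decide_eq_true h2, Bool.false_or, if_true, if_false, Bool.false_eq_true]
      · have hb2 : decide (pvRot cs (cs.length - i) = (pvRot cs (cs.length - i)).reverse) = false :=
          decide_eq_false h2
        simp only [hb1, hb2, Bool.false_or, if_false, Bool.false_eq_true]
        exact ih (fun j hj => h j (by simp [hj]))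

theorem pvFoldlMin_le (a : Int) (l : List Int) :
    l.foldl min a ≤ a ∧ ∀ x ∈ l, l.foldl min a ≤ x := by
  induction l generalizing a with
  | nil => simp
  | cons c rest ih =>
    obtain ⟨h1, h2⟩ := ih (min a c)
    refine ⟨le_trans h1 (by omega), ?_⟩
    intro x hx
    rcases List.mem_cons.mp hx with rfl | hx
    · exact le_trans h1 (by omega)
    · exact h2 x hx

theorem pvFoldlMin_mem (a : Int) (l : List Int) :
    l.foldl min a = a ∨ l.foldl min a ∈ l := by
  induction l generalizing a with
  | nil => simp
  | cons c rest ih =>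
    rcases ih (min a c) with h | h
    · rcases le_or_gt a c with hac | hac
      · left; rw [List.foldl_cons, h]; omega
      · right
        simp only [List.foldl_cons, h]
        have hmc : min a c = c := by omega
        rw [hmc]
        exact List.mem_cons_self
    · right; exact List.mem_cons_of_mem _ h

theorem pvFoldComb_from_nonneg (l : List Int) (h : ∀ x ∈ l, 0 ≤ x) (b : Int) (hb : 0 ≤ b) :
    l.foldl pvComb b = l.foldl min b := by
  induction l generalizing b with
  | nil => rfl
  | cons c rest ih =>
    have hc : 0 ≤ c := h c (by simp)
    have hstep : pvComb b c = min b c := by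
      simp only [pvComb]; split_ifs with h1 <;> simp at h1 <;> omega
    simp only [List.foldl_cons, hstep]
    exact ih (fun x hx => h x (by simp [hx])) _ (by omega)

-- the running minimum is -1 on the empty candidate list, else an attained lower bound
theorem pvFoldComb_spec (l : List Int) (h : ∀ x ∈ l, 0 ≤ x) :
    (l.foldl pvComb (-1) = -1 ∧ l = []) ∨
    (l.foldl pvComb (-1) ∈ l ∧ ∀ x ∈ l, l.foldl pvComb (-1) ≤ x) := by
  cases l with
  | nil => left; exact ⟨rfl, rfl⟩
  | cons c rest =>
    right
    have he : (c :: rest).foldl pvComb (-1) = rest.foldl min c := by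
      have hc : 0 ≤ c := h c (by simp)
      have hstep : pvComb (-1) c = c := by simp [pvComb]
      simp only [List.foldl_cons, hstep]
      exact pvFoldComb_from_nonneg rest (fun x hx => h x (by simp [hx])) c (h c (by simp))
    rw [he]
    constructor
    · rcases pvFoldlMin_mem c rest with h1 | h1
      · rw [h1]; simp
      · exact List.mem_cons_of_mem _ h1
    · intro x hx
      rcases List.mem_cons.mp hx with rfl | hx
      · exact (pvFoldlMin_le _ rest).1
      · exact (pvFoldlMin_le _ rest).2 _ hx

-- lists of nonnegative values with the same members have the same running minimum
theorem pvFoldComb_memEq (l₁ l₂ : List Int) (h₁ : ∀ x ∈ l₁, 0 ≤ x) (h₂ : ∀ x ∈ l₂, 0 ≤ x)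
    (hm : ∀ x, x ∈ l₁ ↔ x ∈ l₂) : l₁.foldl pvComb (-1) = l₂.foldl pvComb (-1) := by
  rcases pvFoldComb_spec l₁ h₁ with ⟨e₁, hn₁⟩ | ⟨m₁, lb₁⟩
  · have hn₂ : l₂ = [] := by
      cases l₂ with
      | nil => rfl
      | cons c rest =>
        exact absurd ((hm c).mpr (by simp)) (by simp [hn₁])
    rw [e₁, hn₂]; rfl
  · rcases pvFoldComb_spec l₂ h₂ with ⟨e₂, hn₂⟩ | ⟨m₂, lb₂⟩
    · exact absurd ((hm _).mp m₁) (by simp [hn₂])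
    · exact le_antisymm (lb₁ _ ((hm _).mpr m₂)) (lb₂ _ ((hm _).mp m₁))

theorem pvMem_cands (cs : List Char) (x : Int) :
    x ∈ pvCandCosts cs ↔ ∃ k ∈ List.range cs.length, pvPk cs k = true ∧
      x = min (k : Int) ((cs.length : Int) - (k : Int)) := by
  rw [pvCandCosts, List.mem_map]
  constructor
  · rintro ⟨k, hkf, he⟩
    rw [List.mem_filter] at hkf
    exact ⟨k, hkf.1, hkf.2, he.symm⟩
  · rintro ⟨k, hk, hp, he⟩
    exact ⟨k, List.mem_filter.mpr ⟨hk, hp⟩, he.symm⟩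

theorem pvCandCosts_nonneg (cs : List Char) : ∀ x ∈ pvCandCosts cs, 0 ≤ x := by
  intro x hx
  obtain ⟨k, hk, _, rfl⟩ := (pvMem_cands cs x).mp hx
  have : k < cs.length := List.mem_range.mp hk
  have : (k : Int) ≤ (cs.length : Int) := by exact_mod_cast Nat.le_of_lt this
  omega

-- the reference value: -1 with no palindromic rotation, else the attained minimal cost
theorem pvRefFold_spec (cs : List Char) :
    ((pvCandCosts cs).foldl pvComb (-1) = -1 ∧
      ∀ k ∈ List.range cs.length, pvPk cs k = false) ∨
    ((∃ k ∈ List.range cs.length, pvPk cs k = true ∧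
        (pvCandCosts cs).foldl pvComb (-1) = min (k : Int) ((cs.length : Int) - (k : Int))) ∧
      ∀ k' ∈ List.range cs.length, pvPk cs k' = true →
        (pvCandCosts cs).foldl pvComb (-1) ≤ min (k' : Int) ((cs.length : Int) - (k' : Int))) := by
  rcases pvFoldComb_spec (pvCandCosts cs) (pvCandCosts_nonneg cs) with ⟨e, hnil⟩ | ⟨hmem, hlb⟩
  · left
    refine ⟨e, fun k hk => ?_⟩
    by_contra hp
    simp only [Bool.not_eq_false] at hp
    have : min (k : Int) ((cs.length : Int) - (k : Int)) ∈ pvCandCosts cs :=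
      (pvMem_cands cs _).mpr ⟨k, hk, hp, rfl⟩
    rw [hnil] at this; simp at this
  · right
    obtain ⟨k, hk, hp, he⟩ := (pvMem_cands cs _).mp hmem
    exact ⟨⟨k, hk, hp, he⟩, fun k' hk' hp' =>
      hlb _ ((pvMem_cands cs _).mpr ⟨k', hk', hp', rfl⟩)⟩

-- A's first-hit scan, appended lists
theorem pvFirstQ_append (cs : List Char) (l₁ l₂ : List Nat) :
    pvFirstQ cs (l₁ ++ l₂) =
      if pvFirstQ cs l₁ = -1 then pvFirstQ cs l₂ else pvFirstQ cs l₁ := by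
  induction l₁ with
  | nil => simp [pvFirstQ]
  | cons i rest ih =>
    simp only [List.cons_append, pvFirstQ]
    by_cases hq : (pvPk cs i || pvPk cs (cs.length - i)) = true
    · have : ¬ ((i : Int) = -1) := by omega
      simp [hq, this]
    · simp [hq, ih]

-- characterisation of A's scan over range n
theorem pvFirstQ_range_spec (cs : List Char) (n : Nat) :
    (pvFirstQ cs (List.range n) = -1 ∧
      ∀ i < n, (pvPk cs i || pvPk cs (cs.length - i)) = false) ∨
    (∃ m < n, (pvPk cs m || pvPk cs (cs.length - m)) = true ∧
      pvFirstQ cs (List.range n) = (m : Int) ∧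
      ∀ j < m, (pvPk cs j || pvPk cs (cs.length - j)) = false) := by
  induction n with
  | zero => left; simp [List.range_zero, pvFirstQ]
  | succ n ih =>
    rw [List.range_succ, pvFirstQ_append]
    rcases ih with ⟨h1, h2⟩ | ⟨m, hm, hq, he, hmin⟩
    · rw [h1]
      simp only [if_true, pvFirstQ]
      by_cases hq : (pvPk cs n || pvPk cs (cs.length - n)) = true
      · right
        exact ⟨n, by omega, hq, by simp [hq], fun j hj => h2 j hj⟩
      · left
        simp only [Bool.not_eq_true] at hq
        refine ⟨by simp [hq], fun i hi => ?_⟩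
        rcases Nat.lt_succ_iff_lt_or_eq.mp hi with h | rfl
        · exact h2 i h
        · exact hq
    · right
      have hne : ¬ (pvFirstQ cs (List.range n) = -1) := by rw [he]; omega
      rw [if_neg hne]
      exact ⟨m, by omega, hq, he, hmin⟩

theorem pvPk_zero (cs : List Char) : pvPk cs 0 = decide (cs = cs.reverse) := by
  simp [pvPk, pvRot]

theorem pvPk_length (cs : List Char) : pvPk cs cs.length = decide (cs = cs.reverse) := by
  simp [pvPk, pvRot_length]

-- A equals the reference value
theorem pvA_eq_ref (cs : List Char) :
    (if pvPal cs then 0 else pvLoopA cs (PySem.List.pyRange 0 (cs.length : Int) 1)) =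
      (if (cs.length : Int) = 0 then 0 else (pvCandCosts cs).foldl pvComb (-1)) := by
  rw [show PySem.List.pyRange 0 (cs.length : Int) 1 =
      List.map (fun (k : Nat) => (k : Int)) (List.range cs.length) from
    PySem.List.pyRange_zero_natCast cs.length]
  rw [pvLoopA_eq cs (List.range cs.length) (fun i hi => List.mem_range.mp hi), pvPal_eq]
  have hspec := pvRefFold_spec cs
  have hfq := pvFirstQ_range_spec cs cs.length
  by_cases hpal : cs = cs.reverse
  · -- A returns 0; the reference minimum has the candidate 0 at k = 0
    rw [decide_eq_true hpal, if_pos rfl]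
    by_cases hn : (cs.length : Int) = 0
    · rw [if_pos hn]
    · rw [if_neg hn]
      have hlen : 0 < cs.length := by omega
      have hpk0 : pvPk cs 0 = true := by rw [pvPk_zero]; exact decide_eq_true hpal
      rcases hspec with ⟨_, hall⟩ | ⟨⟨k, hk, hpk, he⟩, hminim⟩
      · exact absurd hpk0 (by simp [hall 0 (List.mem_range.mpr hlen)])
      · have h1 := hminim 0 (List.mem_range.mpr hlen) hpk0
        have hk' : k < cs.length := List.mem_range.mp hk
        have hk2 : (k : Int) < (cs.length : Int) := by exact_mod_cast hk'
        simp only [Nat.cast_zero] at h1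
        omega
  · -- A scans; both sides compute the same minimal shift
    have hb : decide (cs = cs.reverse) = false := decide_eq_false hpal
    rw [hb, if_neg (by simp)]
    have hlen : 0 < cs.length := by
      rcases Nat.eq_zero_or_pos cs.length with h0 | h0
      · exact absurd (by simp [List.length_eq_zero_iff.mp h0]) hpal
      · exact h0
    rw [if_neg (by exact_mod_cast Nat.pos_iff_ne_zero.mp hlen)]
    have hpk0 : pvPk cs 0 = false := by rw [pvPk_zero]; exact hb
    have hpkn : pvPk cs cs.length = false := by rw [pvPk_length]; exact hb
    rcases hfq with ⟨he1, hall⟩ | ⟨m, hm, hq, he1, hmin⟩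
    · -- no shift works on either side
      rw [he1]
      rcases hspec with ⟨he2, _⟩ | ⟨⟨k, hk, hpk, _⟩, _⟩
      · rw [he2]
      · have hk' : k < cs.length := List.mem_range.mp hk
        have := hall k hk'
        simp [hpk] at this
    · -- A finds first hit m; the reference minimum equals m
      rw [he1]
      have hm0 : m ≠ 0 := by
        intro h0; subst h0
        simp [hpk0, hpkn] at hq
      have hqor : pvPk cs m = true ∨ pvPk cs (cs.length - m) = true := by
        simpa [Bool.or_eq_true] using hq
      rcases hspec with ⟨_, hall2⟩ | ⟨⟨k, hk, hpk, he2⟩, hminim⟩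
      · rcases hqor with hp | hp
        · simp [hall2 m (List.mem_range.mpr hm)] at hp
        · have : cs.length - m < cs.length := by omega
          simp [hall2 _ (List.mem_range.mpr this)] at hp
      · have hk' : k < cs.length := List.mem_range.mp hk
        have hkc : (k : Int) < (cs.length : Int) := by exact_mod_cast hk'
        -- upper bound: the reference minimum is at most m
        have hub : (pvCandCosts cs).foldl pvComb (-1) ≤ (m : Int) := by
          rcases hqor with hp | hp
          · have h1 := hminim m (List.mem_range.mpr hm) hp
            have : (m : Int) ≤ (cs.length : Int) := by exact_mod_cast Nat.le_of_lt hm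
            omega
          · have hlt : cs.length - m < cs.length := by omega
            have h1 := hminim _ (List.mem_range.mpr hlt) hp
            have hc1 : ((cs.length - m : Nat) : Int) = (cs.length : Int) - (m : Int) := by
              have : m ≤ cs.length := Nat.le_of_lt hm
              push_cast [this]; ring
            rw [hc1] at h1
            have : (m : Int) ≤ (cs.length : Int) := by exact_mod_cast Nat.le_of_lt hm
            omega
        -- lower bound: every earlier shift is refuted by A's minimality
        have hlb : (m : Int) ≤ (pvCandCosts cs).foldl pvComb (-1) := by
          by_contra hlt
          rw [Int.not_le] at hlt
          rw [he2] at hlt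
          have hcases : k < m ∨ cs.length - k < m := by
            rcases le_or_gt (m : Int) (k : Int) with h | h
            · right
              have : (cs.length : Int) - (k : Int) < (m : Int) := by omega
              omega
            · left; exact_mod_cast h
          rcases hcases with hc | hc
          · have := hmin k hc
            simp [hpk] at this
          · have := hmin _ hc
            have hkk : cs.length - (cs.length - k) = k := by omega
            rw [hkk] at this
            simp [hpk] at this
        omega

-- ======================= B-side lemmas =======================

-- rotation k is a palindrome iff the reversed string rotated by 2n-2k gives back s
theorem pvPk_iff_rotRev (cs : List Char) (k : Nat) (hk : k < cs.length) :
    pvPk cs k = true ↔ cs = cs.reverse.rotate (2 * cs.length - 2 * k) := by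
  have hrot : pvRot cs k = cs.rotate k :=
    (List.rotate_eq_drop_append_take (Nat.le_of_lt hk)).symm
  have hkmod : k % cs.length = k := Nat.mod_eq_of_lt hk
  have hrev : (cs.rotate k).reverse = cs.reverse.rotate (cs.length - k) := by
    rw [List.reverse_rotate, hkmod]
  rw [pvPk, decide_eq_true_iff, hrot, hrev]
  have hlen : (cs.reverse.rotate (cs.length - k)).length = cs.length := by simp
  rw [List.rotate_eq_iff, hlen, hkmod, List.rotate_rotate]
  have : cs.length - k + (cs.length - k) = 2 * cs.length - 2 * k := by omega
  rw [this]

-- an occurrence of s at position j < n of rev(s)+rev(s) is exactly 'rev(s) rotated by j is s'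
theorem pvPrefix_iff_occ (cs : List Char) (j : Nat) (hj : j < cs.length) :
    (cs <+: (cs.reverse ++ cs.reverse).drop j) ↔ cs = cs.reverse.rotate j := by
  have hjle : j ≤ cs.reverse.length := by simp; omega
  rw [List.prefix_iff_eq_take, List.drop_append]
  have h0 : j - cs.reverse.length = 0 := by simp; omega
  rw [h0, List.drop_zero, List.take_append]
  have h1 : (cs.reverse.drop j).length = cs.length - j := by simp
  have h2 : cs.reverse.drop j ++ cs.reverse.take (cs.length - (cs.reverse.drop j).length) =
      cs.reverse.rotate j := by
    rw [h1]
    have h3 : cs.length - (cs.length - j) = j := by omega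
    rw [h3, (List.rotate_eq_drop_append_take (by simp; omega) : cs.reverse.rotate j = _)]
  have h5 : List.take cs.length (cs.reverse.drop j) = cs.reverse.drop j :=
    List.take_of_length_le (by simp)
  rw [h5, h2]

theorem pvModTwo (a : Nat) : PySem.Int.mod (a : Int) 2 = ((a % 2 : Nat) : Int) := by
  rw [PySem.Int.mod_eq_emod_of_pos (by norm_num)]; push_cast; rfl

theorem pvDivTwo (a : Nat) : PySem.Int.floordiv (a : Int) 2 = ((a / 2 : Nat) : Int) := by
  rw [PySem.Int.floordiv_eq_ediv_of_pos (by norm_num)]; push_cast; rfl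

-- shift k answers occurrence j exactly when 2k is (n-j) mod n, possibly plus n
theorem pvMod_iff (n j k : Nat) (hn : 0 < n) (hj : j < n) (hk : k < n) :
    (2 * n - 2 * k) % n = j ↔ (2 * k = (n - j) % n ∨ 2 * k = (n - j) % n + n) := by
  have hMj : (n - j) % n = if j = 0 then 0 else n - j := by
    by_cases h0 : j = 0
    · subst h0; simp
    · rw [if_neg h0]; exact Nat.mod_eq_of_lt (by omega)
  rcases Nat.eq_zero_or_pos k with rfl | hkpos
  · -- k = 0 : (2n) mod n = 0
    have hL : (2 * n - 2 * 0) % n = 0 := by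
      rw [show 2 * n - 2 * 0 = n + n by omega, Nat.add_mod_left, Nat.mod_self]
    rw [hL, hMj]
    split_ifs with h0 <;> omega
  rcases Nat.lt_or_ge (2 * k) n with h2k | h2k
  · -- 0 < 2k < n : 2n - 2k ∈ (n, 2n)
    have hL : (2 * n - 2 * k) % n = n - 2 * k := by
      rw [Nat.mod_eq_sub_mod (by omega), show 2 * n - 2 * k - n = n - 2 * k by omega]
      exact Nat.mod_eq_of_lt (by omega)
    rw [hL, hMj]
    split_ifs with h0 <;> omega
  · rcases Nat.eq_or_lt_of_le h2k with h2k' | h2k'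
    · -- 2k = n
      have hL : (2 * n - 2 * k) % n = 0 := by
        rw [show 2 * n - 2 * k = n by omega, Nat.mod_self]
      rw [hL, hMj]
      split_ifs with h0 <;> omega
    · -- 2k > n : 2n - 2k < n
      have hL : (2 * n - 2 * k) % n = 2 * n - 2 * k := Nat.mod_eq_of_lt (by omega)
      rw [hL, hMj]
      split_ifs with h0 <;> omega

-- the port's ks list over casts of naturals: exactly the k < n with (2n-2k) mod n = j
theorem pvKsB_mem_iff (n j : Nat) (hn : 0 < n) (hj : j < n) (x : Int) :
    x ∈ pvKsB (n : Int) (j : Int) ↔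
      ∃ k : Nat, k < n ∧ x = (k : Int) ∧ (2 * n - 2 * k) % n = j := by
  have hM : PySem.Int.mod ((n : Int) - (j : Int)) ((n : Int)) = (((n - j) % n : Nat) : Int) := by
    rw [show ((n : Int) - (j : Int)) = ((n - j : Nat) : Int) by omega]
    exact PySem.Int.mod_natCast _ _
  have hMlt : (n - j) % n < n := Nat.mod_lt _ hn
  have hcast : ((((n - j) % n : Nat) : Int) + (n : Int)) = ((((n - j) % n + n) : Nat) : Int) := by
    push_cast; ring
  have hiff : ∀ k : Nat, k < n →
      ((2 * n - 2 * k) % n = j ↔ (2 * k = (n - j) % n ∨ 2 * k = (n - j) % n + n)) :=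
    fun k hk => pvMod_iff n j k hn hj hk
  simp only [pvKsB, hM, hcast, pvModTwo, pvDivTwo, Nat.cast_eq_zero, Nat.cast_eq_one,
    List.singleton_append]
  constructor
  · intro hx
    split_ifs at hx with h1 h2 h3
    · rcases List.mem_cons.mp hx with rfl | hx2
      · exact ⟨(n - j) % n / 2, by omega, rfl, (hiff _ (by omega)).mpr (Or.inl (by omega))⟩
      · rw [List.mem_singleton] at hx2
        subst hx2
        exact ⟨(n - j) % n / 2 + n / 2, by omega, rfl, (hiff _ (by omega)).mpr (Or.inr (by omega))⟩
    · rcases List.mem_cons.mp hx with rfl | hx2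
      · exact ⟨(n - j) % n / 2, by omega, rfl, (hiff _ (by omega)).mpr (Or.inl (by omega))⟩
      · exact absurd hx2 (List.not_mem_nil)
    · rw [List.mem_singleton] at hx
      subst hx
      exact ⟨((n - j) % n + n) / 2, by omega, rfl, (hiff _ (by omega)).mpr (Or.inr (by omega))⟩
    · exact absurd hx (List.not_mem_nil)
  · rintro ⟨k, hk, rfl, hmod⟩
    have h2k := (hiff k hk).mp hmod
    split_ifs with h1 h2 h3
    · simp only [List.mem_cons, List.not_mem_nil, or_false, Nat.cast_inj]
      omega
    · simp only [List.mem_cons, List.not_mem_nil, or_false, Nat.cast_inj]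
      omega
    · simp only [List.mem_singleton, Nat.cast_inj]
      omega
    · exfalso; omega

-- one step of the occurrence filter: the first occurrence j0 splits the list
theorem pvFilter_first (n j0 start : Nat) (q : Nat → Bool) (h0 : start ≤ j0) (hj0 : j0 < n)
    (hq : q j0 = true) (hmin : ∀ j, start ≤ j → j < j0 → q j = false) :
    (List.range n).filter (fun j => decide (start ≤ j) && q j) =
      j0 :: (List.range n).filter (fun j => decide (j0 + 1 ≤ j) && q j) := by
  rw [show n = (j0 + 1) + (n - (j0 + 1)) by omega, List.range_add]
  rw [List.filter_append, List.filter_append]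
  have hfirst : (List.range (j0 + 1)).filter (fun j => decide (start ≤ j) && q j) = [j0] := by
    rw [List.range_succ, List.filter_append]
    have hnil : (List.range j0).filter (fun j => decide (start ≤ j) && q j) = [] := by
      rw [List.filter_eq_nil_iff]
      intro j hj
      have hjlt : j < j0 := List.mem_range.mp hj
      by_cases hs : start ≤ j
      · simp [hs, hmin j hs hjlt]
      · simp [hs]
    rw [hnil]
    simp [h0, hq]
  have hsecond : (List.range (j0 + 1)).filter (fun j => decide (j0 + 1 ≤ j) && q j) = [] := by
    rw [List.filter_eq_nil_iff]
    intro j hj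
    have : j < j0 + 1 := List.mem_range.mp hj
    simp [show ¬ (j0 + 1 ≤ j) by omega]
  have hcongr : ((List.range (n - (j0 + 1))).map (j0 + 1 + ·)).filter
        (fun j => decide (start ≤ j) && q j)
      = ((List.range (n - (j0 + 1))).map (j0 + 1 + ·)).filter
        (fun j => decide (j0 + 1 ≤ j) && q j) := by
    apply List.filter_congr
    intro x hx
    obtain ⟨i, _, rfl⟩ := List.mem_map.mp hx
    simp [show start ≤ j0 + 1 + i by omega, show j0 + 1 ≤ j0 + 1 + i by omega]
  rw [hfirst, hsecond, hcongr]
  rfl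

theorem pvInfix_iff (sub t : List Char) : sub <:+: t ↔ ∃ i, sub <+: t.drop i := by
  rw [← PySem.Chars.isIn_iff_infix, ← PySem.Chars.exists_prefix_drop_iff_isIn]

-- B's while loop equals a fold of the ks-update over the occurrences ≥ start
theorem pvLoopB_eq (cs : List Char) :
    ∀ (fuel start : Nat), start ≤ cs.length → cs.length - start < fuel → ∀ best : Int,
    pvLoopB (cs.reverse ++ cs.reverse) cs (cs.length : Int) fuel
        (PySem.Chars.findFrom (cs.reverse ++ cs.reverse) cs (start : Int) none) best =
      ((List.range cs.length).filter (fun j => decide (start ≤ j) && pvOcc cs j)).foldl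
        (fun (b : Int) (j : Nat) => (pvKsB (cs.length : Int) (j : Int)).foldl
          (fun b k => pvComb b (pvCost (cs.length : Int) k)) b) best := by
  intro fuel
  induction fuel with
  | zero => intro start hstart hfuel best; omega
  | succ fuel ih =>
    intro start hstart hfuel best
    set t := cs.reverse ++ cs.reverse with ht
    have hlen : t.length = cs.length + cs.length := by rw [ht]; simp
    have hlt : start ≤ t.length := by omega
    set f := PySem.Chars.findFrom t cs (start : Int) none with hf
    by_cases hneg : f = -1
    · -- no occurrence at or after start anywhere: the loop exits and the filter is empty
      have hnone : ∀ j, start ≤ j → ¬ cs <+: t.drop j := by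
        have hni := (PySem.Chars.findFrom_natCast_eq_neg_one_iff t cs start hlt).mp hneg
        intro j hj hp
        apply hni
        rw [pvInfix_iff]
        refine ⟨j - start, ?_⟩
        rw [List.drop_drop, show start + (j - start) = j by omega]
        exact hp
      have hfilt : (List.range cs.length).filter
          (fun j => decide (start ≤ j) && pvOcc cs j) = [] := by
        rw [List.filter_eq_nil_iff]
        intro j hj
        have hjlt := List.mem_range.mp hj
        by_cases hs : start ≤ j
        · have hof : pvOcc cs j = false := by
            apply decide_eq_false; intro hocc
            exact hnone j hs ((pvPrefix_iff_occ cs j hjlt).mpr hocc)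
          simp [hs, hof]
        · simp [hs]
      rw [hfilt]
      simp only [pvLoopB]
      rw [if_neg (by rw [hneg]; intro hc; omega)]
      rfl
    · -- f points at the first occurrence ≥ start
      obtain ⟨hge, hpre, hmin⟩ := PySem.Chars.findFrom_natCast_spec t cs start hlt hneg
      have hfval : f = (f.toNat : Int) := (Int.toNat_of_nonneg (by omega)).symm
      set j0 := f.toNat with hj0
      by_cases hj0n : j0 < cs.length
      · -- the loop runs once with j = j0 and recurses from j0 + 1
        have hocc : pvOcc cs j0 = true :=
          decide_eq_true ((pvPrefix_iff_occ cs j0 hj0n).mp hpre)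
        have hstartj0 : start ≤ j0 := by omega
        have hfilt := pvFilter_first cs.length j0 start (pvOcc cs) hstartj0 hj0n hocc
          (fun j hs hlt' => by
            apply decide_eq_false; intro ho
            exact hmin j hs hlt' ((pvPrefix_iff_occ cs j (by omega)).mpr ho))
        rw [hfilt, List.foldl_cons]
        simp only [pvLoopB]
        rw [if_pos (by rw [hfval]; exact ⟨by omega, by exact_mod_cast hj0n⟩)]
        rw [hfval, show ((j0 : Int) + 1) = ((j0 + 1 : Nat) : Int) by push_cast; ring]
        exact ih (j0 + 1) (by omega) (by omega) _
      · -- the first occurrence lies at or past n: the loop exits and the filter is empty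
        have hfilt : (List.range cs.length).filter
            (fun j => decide (start ≤ j) && pvOcc cs j) = [] := by
          rw [List.filter_eq_nil_iff]
          intro j hj
          have hjlt := List.mem_range.mp hj
          by_cases hs : start ≤ j
          · have hof : pvOcc cs j = false := by
              apply decide_eq_false; intro hocc
              exact hmin j hs (by omega) ((pvPrefix_iff_occ cs j hjlt).mpr hocc)
            simp [hs, hof]
          · simp [hs]
        rw [hfilt]
        simp only [pvLoopB]
        rw [if_neg (by
          rw [hfval]; intro hc
          have : j0 < cs.length := by exact_mod_cast hc.2
          omega)]
        rfl

-- folding the ks-updates over the occurrences = one comb-fold over all produced costs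
theorem pvFoldl_flatMap (g : Nat → List Int) (f : Int → Int → Int) (l : List Nat) (b : Int) :
    (l.flatMap g).foldl f b = l.foldl (fun b a => (g a).foldl f b) b := by
  induction l generalizing b <;> simp_all

-- membership of the flattened shift list: exactly the palindromic shifts
theorem pvKflat_mem (cs : List Char) (hn : 0 < cs.length) (x : Int) :
    x ∈ ((List.range cs.length).filter (pvOcc cs)).flatMap
        (fun (j : Nat) => pvKsB (cs.length : Int) (j : Int)) ↔
      ∃ k : Nat, k < cs.length ∧ pvPk cs k = true ∧ x = (k : Int) := by
  have hrotmod : ∀ m : Nat, cs.reverse.rotate (m % cs.length) = cs.reverse.rotate m := by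
    intro m
    conv_lhs => rw [show cs.length = cs.reverse.length by simp]
    exact List.rotate_mod _ _
  rw [List.mem_flatMap]
  constructor
  · rintro ⟨j, hjmem, hx⟩
    rw [List.mem_filter] at hjmem
    have hjlt : j < cs.length := List.mem_range.mp hjmem.1
    obtain ⟨k, hk, rfl, hmod⟩ := (pvKsB_mem_iff cs.length j hn hjlt x).mp hx
    refine ⟨k, hk, ?_, rfl⟩
    rw [pvPk_iff_rotRev cs k hk]
    have hocc : cs = cs.reverse.rotate j := of_decide_eq_true hjmem.2
    refine hocc.trans ?_
    rw [← hmod]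
    exact hrotmod _
  · rintro ⟨k, hk, hpk, rfl⟩
    have hjlt : (2 * cs.length - 2 * k) % cs.length < cs.length := Nat.mod_lt _ hn
    refine ⟨(2 * cs.length - 2 * k) % cs.length,
      List.mem_filter.mpr ⟨List.mem_range.mpr hjlt, ?_⟩,
      (pvKsB_mem_iff cs.length _ hn hjlt _).mpr ⟨k, hk, rfl, rfl⟩⟩
    apply decide_eq_true
    rw [hrotmod]
    exact (pvPk_iff_rotRev cs k hk).mp hpk

-- B equals the reference value
theorem pvB_eq_ref (cs : List Char) (hn : 0 < cs.length) :
    pvLoopB (cs.reverse ++ cs.reverse) cs (cs.length : Int) (cs.length + 1)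
        (PySem.Chars.find (cs.reverse ++ cs.reverse) cs) (-1) =
      (pvCandCosts cs).foldl pvComb (-1) := by
  have h0 : PySem.Chars.find (cs.reverse ++ cs.reverse) cs =
      PySem.Chars.findFrom (cs.reverse ++ cs.reverse) cs ((0 : Nat) : Int) none := by
    rw [Nat.cast_zero]; exact (PySem.Chars.findFrom_zero _ _).symm
  rw [h0, pvLoopB_eq cs (cs.length + 1) 0 (by omega) (by omega) (-1)]
  have hsimp : (List.range cs.length).filter (fun j => decide (0 ≤ j) && pvOcc cs j) =
      (List.range cs.length).filter (fun j => pvOcc cs j) := by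
    apply List.filter_congr; intro x _; simp
  rw [hsimp, ← pvFoldl_flatMap, ← List.foldl_map]
  apply pvFoldComb_memEq
  · intro x hx
    obtain ⟨kk, hkk, rfl⟩ := List.mem_map.mp hx
    obtain ⟨k, hklt, _, rfl⟩ := (pvKflat_mem cs hn kk).mp hkk
    have : (k : Int) < (cs.length : Int) := by exact_mod_cast hklt
    simp only [pvCost]
    omega
  · exact pvCandCosts_nonneg cs
  · intro x
    rw [List.mem_map, pvMem_cands]
    constructor
    · rintro ⟨kk, hkk, rfl⟩
      obtain ⟨k, hklt, hpk, rfl⟩ := (pvKflat_mem cs hn kk).mp hkk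
      exact ⟨k, List.mem_range.mpr hklt, hpk, rfl⟩
    · rintro ⟨k, hk, hpk, rfl⟩
      exact ⟨(k : Int), (pvKflat_mem cs hn _).mpr ⟨k, List.mem_range.mp hk, hpk, rfl⟩, rfl⟩

theorem pv_main (s : String) : is_cyclic_palindrome s = is_cyclic_palindrome_alt s := by
  show (if pvPal s.toList then 0
      else pvLoopA s.toList (PySem.List.pyRange 0 (s.toList.length : Int) 1)) = _
  rw [pvA_eq_ref s.toList]
  by_cases hn : (s.toList.length : Int) = 0
  · simp only [is_cyclic_palindrome_alt, hn, if_true]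
  · rw [if_neg hn]
    have hpos : 0 < s.toList.length := by omega
    simp only [is_cyclic_palindrome_alt]
    rw [if_neg hn]
    exact (pvB_eq_ref s.toList hpos).symm

-- ===== VERDICT (by name: the statement is the Claim_ definition above) =====
theorem is_cyclic_palindrome_spec : Claim_equal_is_cyclic_palindrome := by
  intro s _
  show is_cyclic_palindrome s = is_cyclic_palindrome_alt s
  exact pv_main s
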